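-- pv_equiv track=rewrite | github.com/SergioRyzhov/python | lesson3/task_5.py | add_func
-- ===== SOURCE A (Python) =====
-- def add_func(arg):
--     result = 0
--     for i in arg.split():
--         try:
--             result = result + int(i)
--         except ValueError:
--             return result
--     return result
-- ===== SOURCE B (Python) =====
-- def add_func(arg):
--     def is_int(t):
--         try:
--             int(t)
--             return True
--         except ValueError:
--             return False
--     tokens = arg.split()
--     flags = [is_int(t) for t in tokens]
--     n = flags.index(False) if False in flags else len(tokens)
--     return sum(int(t) for t in tokens[:n])
-- ===== Notes on version B (the rewrite author's own statement) =====
-- stated objective: alternative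
-- what changed: The single accumulate-until-failure loop is replaced by a phase decomposition: map tokens to validity flags, locate the first invalid token with list.index, slice the valid prefix, and sum it in a separate pass.
import Mathlib
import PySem

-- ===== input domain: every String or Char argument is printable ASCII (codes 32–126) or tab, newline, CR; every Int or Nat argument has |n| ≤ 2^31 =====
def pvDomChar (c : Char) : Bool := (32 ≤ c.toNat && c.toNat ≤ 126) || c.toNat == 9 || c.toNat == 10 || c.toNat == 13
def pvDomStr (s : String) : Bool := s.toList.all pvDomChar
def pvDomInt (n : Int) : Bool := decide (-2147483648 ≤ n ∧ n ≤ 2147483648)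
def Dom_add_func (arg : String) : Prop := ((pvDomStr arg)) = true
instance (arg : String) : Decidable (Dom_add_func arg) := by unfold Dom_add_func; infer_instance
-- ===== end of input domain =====

-- B replaces A's single accumulate-until-failure loop by a phase decomposition
-- (validity flags, index of first failure, slice, separate summation); same cost.

-- ===== PORT A =====
def addFuncLoop : List String → Int → Int
  | [], result => result
  | i :: rest, result =>
    match PySem.Int.ofStr? i with
    | some v => addFuncLoop rest (result + v)
    | none => result

def add_func (arg : String) : Int := addFuncLoop (PySem.Str.split₀ arg) 0

-- ===== PORT B =====
def add_func_alt (arg : String) : Int :=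
  let tokens := PySem.Str.split₀ arg
  let flags := tokens.map (fun t => (PySem.Int.ofStr? t).isSome)
  let n : Nat :=
    match PySem.List.index? flags false with
    | some k => k
    | none => tokens.length
  (tokens.take n).foldl (fun acc t => acc + (PySem.Int.ofStr? t).getD 0) 0

-- ===== PRECONDITION & SPEC =====
def Spec_add_func (arg : String) (out : Int) : Prop := out = add_func_alt arg
instance (arg : String) (out : Int) : Decidable (Spec_add_func arg out) := by unfold Spec_add_func; infer_instance

-- ===== CLAIM (what is proved, stated in full; the proofs are below) =====
def Claim_equal_add_func : Prop := ∀ (arg : String), Dom_add_func arg → Spec_add_func arg (add_func arg)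

-- ===== LEMMAS AND PROOFS =====

-- Reference sum of the leading run of int-parsable tokens.
def sumPrefix : List String → Int
  | [] => 0
  | t :: rest =>
    match PySem.Int.ofStr? t with
    | some v => v + sumPrefix rest
    | none => 0

theorem addFuncLoop_eq (l : List String) (r : Int) : addFuncLoop l r = r + sumPrefix l := by
  induction l generalizing r with
  | nil => simp [addFuncLoop, sumPrefix]
  | cons t rest ih =>
    cases h : PySem.Int.ofStr? t with
    | some v => simp [addFuncLoop, sumPrefix, h, ih]; ring
    | none => simp [addFuncLoop, sumPrefix, h]

theorem foldl_add_shift (l : List String) (c : Int) :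
    l.foldl (fun acc t => acc + (PySem.Int.ofStr? t).getD 0) c
      = c + l.foldl (fun acc t => acc + (PySem.Int.ofStr? t).getD 0) 0 := by
  induction l generalizing c with
  | nil => simp
  | cons t rest ih =>
    simp only [List.foldl]
    rw [ih, ih ((0:Int) + _)]
    ring

theorem alt_core_eq (l : List String) :
    (l.take (match PySem.List.index? (l.map (fun t => (PySem.Int.ofStr? t).isSome)) false with
             | some k => k
             | none => l.length)).foldl (fun acc t => acc + (PySem.Int.ofStr? t).getD 0) 0
      = sumPrefix l := by
  induction l with
  | nil => simp [sumPrefix]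
  | cons t rest ih =>
    cases h : PySem.Int.ofStr? t with
    | some v =>
      have hflag : ((PySem.Int.ofStr? t).isSome : Bool) = true := by simp [h]
      rw [List.map_cons, hflag]
      have hidx : PySem.List.index? (true :: List.map (fun t => (PySem.Int.ofStr? t).isSome) rest) false
          = (PySem.List.index? (List.map (fun t => (PySem.Int.ofStr? t).isSome) rest) false).map (· + 1) :=
        PySem.List.index?_cons_of_ne _ (by simp)
      rw [hidx]
      cases hk : PySem.List.index? (List.map (fun t => (PySem.Int.ofStr? t).isSome) rest) false with
      | some k =>
        simp only [Option.map_some, List.take_succ_cons, List.foldl_cons, h, Option.getD_some]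
        rw [foldl_add_shift]
        simp only [hk] at ih
        rw [ih]
        simp [sumPrefix, h]
      | none =>
        simp only [Option.map_none, List.length_cons, List.take_succ_cons, List.foldl_cons,
          h, Option.getD_some, List.take_length]
        rw [foldl_add_shift]
        simp only [hk, List.take_length] at ih
        rw [ih]
        simp [sumPrefix, h]
    | none =>
      have hflag : ((PySem.Int.ofStr? t).isSome : Bool) = false := by simp [h]
      rw [List.map_cons, hflag, PySem.List.index?_cons_self]
      simp [sumPrefix, h]

-- ===== VERDICT (by name: the statement is the Claim_ definition above) =====
theorem add_func_spec : Claim_equal_add_func := by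
  intro arg _
  unfold Spec_add_func add_func add_func_alt
  rw [addFuncLoop_eq, alt_core_eq]
  ring
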